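-- pv_equiv track=rewrite | github.com/mangireddysneha/Smart_Resume_Parser | Smart Resume Parser/app.py | normalize_tech_skills
-- ===== SOURCE A (Python) =====
-- def normalize_tech_skills(skills):
--     mapped = []
--     for s in skills:
--         stxt = s.strip().lower()
--         if stxt in ["js", "javascript"]:
--             if "JavaScript" not in mapped:
--                 mapped.append("JavaScript")
--         else:
--             sval = s.strip().title()
--             if sval not in mapped:
--                 mapped.append(sval)
--     return mapped
-- ===== SOURCE B (Python) =====
-- def normalize_tech_skills(skills):
--     def norm_one(s):
--         t = s.strip()
--         return "JavaScript" if t.lower() in ("js", "javascript") else t.title()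
--
--     def dedup(xs):
--         # first element survives; every later copy of it is filtered away
--         # before recursing, so no membership test against the output is needed
--         if not xs:
--             return []
--         head = xs[0]
--         return [head] + dedup([y for y in xs[1:] if y != head])
--
--     return dedup([norm_one(s) for s in skills])
-- ===== Notes on version B (the rewrite author's own statement) =====
-- stated objective: alternative
-- what changed: A's single loop interleaving normalization with membership scans over the growing output is replaced by a pure map pass followed by a recursive dedup that keeps the head and filters all later copies of it out of the remainder before recursing, so no membership test against the output exists.
import Mathlib
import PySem

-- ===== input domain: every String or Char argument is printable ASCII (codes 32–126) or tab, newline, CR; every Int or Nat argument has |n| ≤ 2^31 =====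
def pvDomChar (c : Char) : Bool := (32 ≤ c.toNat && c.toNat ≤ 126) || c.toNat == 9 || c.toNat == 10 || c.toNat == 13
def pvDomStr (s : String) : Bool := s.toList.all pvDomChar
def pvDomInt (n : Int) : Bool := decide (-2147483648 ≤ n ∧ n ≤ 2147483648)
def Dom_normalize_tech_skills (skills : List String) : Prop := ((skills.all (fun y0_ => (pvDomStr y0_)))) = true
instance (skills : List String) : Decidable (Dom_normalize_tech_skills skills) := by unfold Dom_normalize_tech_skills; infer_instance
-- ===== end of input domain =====

-- B replaces A's single loop with interleaved membership scans over the growing output by a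
-- pure map pass followed by a recursive dedup that keeps the head and filters its later copies
-- out of the remainder before recursing; objective: alternative decomposition, same cost.

-- ===== PORT A =====
-- str.title() is not in PySem: hand port, exact on ASCII — a letter is uppercased iff the
-- previous character is not a letter (Python's "cased" = letters on the ASCII domain).
def pyTitleChars (prevCased : Bool) (cs : List Char) : List Char :=
  match cs with
  | [] => []
  | c :: rest =>
    if PySem.Chars.isalpha c then
      (if prevCased then PySem.Chars.lowerChar c else PySem.Chars.upperChar c)
        :: pyTitleChars true rest
    else
      c :: pyTitleChars false rest

def pyTitle (s : String) : String := String.ofList (pyTitleChars false s.toList)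

-- A's loop body, as a named helper
def stepA (mapped : List String) (s : String) : List String :=
  let stxt := PySem.Str.lower (PySem.Str.strip s)
  if stxt ∈ ["js", "javascript"] then
    if "JavaScript" ∈ mapped then mapped else mapped ++ ["JavaScript"]
  else
    let sval := pyTitle (PySem.Str.strip s)
    if sval ∈ mapped then mapped else mapped ++ [sval]

def normalize_tech_skills (skills : List String) : List String :=
  skills.foldl stepA []

-- ===== PORT B =====
def normOne (s : String) : String :=
  let t := PySem.Str.strip s
  if PySem.Str.lower t ∈ ["js", "javascript"] then "JavaScript" else pyTitle t

-- Source B's dedup: keep the head, drop all its later copies, recurse on the rest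
def dedupRec (xs : List String) : List String :=
  match xs with
  | [] => []
  | h :: rest => h :: dedupRec (rest.filter (fun y => decide (y ≠ h)))
termination_by xs.length
decreasing_by
  simp only [List.length_unattach]
  exact Nat.lt_succ_of_le (le_trans (List.length_filter_le _ _) (by simp))

def normalize_tech_skills_alt (skills : List String) : List String :=
  dedupRec (skills.map normOne)

-- ===== PRECONDITION & SPEC =====
def Spec_normalize_tech_skills (skills : List String) (out : List String) : Prop := out = normalize_tech_skills_alt skills
instance (skills : List String) (out : List String) : Decidable (Spec_normalize_tech_skills skills out) := by unfold Spec_normalize_tech_skills; infer_instance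

-- ===== CLAIM (what is proved, stated in full; the proofs are below) =====
def Claim_equal_normalize_tech_skills : Prop := ∀ (skills : List String), Dom_normalize_tech_skills skills → Spec_normalize_tech_skills skills (normalize_tech_skills skills)

-- ===== LEMMAS AND PROOFS =====

-- One step of A's loop is exactly PySem.Set.add of the normalized value.
theorem stepA_eq_add (mapped : List String) (s : String) :
    stepA mapped s = PySem.Set.add mapped (normOne s) := by
  simp only [stepA, normOne, PySem.Set.add, PySem.Set.contains_eq_listContains,
    List.contains_eq_mem]
  split_ifs <;> simp_all

theorem foldA_eq_add (skills : List String) :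
    ∀ acc : List String,
      skills.foldl stepA acc = (skills.map normOne).foldl PySem.Set.add acc := by
  induction skills with
  | nil => intro acc; simp only [List.map_nil, List.foldl_nil]
  | cons x xs ih =>
    intro acc
    rw [List.map_cons, List.foldl_cons, List.foldl_cons, stepA_eq_add, ih]

theorem mem_add (acc : List String) (x y : String) (h : x ∈ acc) :
    x ∈ PySem.Set.add acc y := by
  simp only [PySem.Set.add]
  split <;> simp [h]

-- adding an element already in the accumulator is a no-op, so its copies may be filtered out
theorem foldl_add_filter (x : String) :
    ∀ (l acc : List String), x ∈ acc →
      l.foldl PySem.Set.add acc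
        = (l.filter (fun y => decide (y ≠ x))).foldl PySem.Set.add acc := by
  intro l
  induction l with
  | nil => intro acc _; rfl
  | cons y ys ih =>
    intro acc hx
    by_cases hyx : y = x
    · subst hyx
      have hadd : PySem.Set.add acc y = acc := by
        simp [PySem.Set.add, PySem.Set.contains_eq_listContains, List.contains_eq_mem, hx]
      simp only [List.filter_cons, decide_not, List.foldl_cons, hadd]
      simp [ih acc hx]
    · simp only [List.filter_cons]
      have : (fun y => decide (y ≠ x)) y = true := by simp [hyx]
      simp only [this, if_pos, List.foldl_cons]
      exact ih _ (mem_add acc x y hx)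

-- an element absent from the rest of the input can be peeled off the accumulator
theorem foldl_add_cons (x : String) :
    ∀ (l acc : List String), x ∉ l →
      l.foldl PySem.Set.add (x :: acc) = x :: l.foldl PySem.Set.add acc := by
  intro l
  induction l with
  | nil => intro acc _; rfl
  | cons y ys ih =>
    intro acc hx
    have hyx : y ≠ x := fun h => hx (by simp [h])
    have hys : x ∉ ys := fun h => hx (by simp [h])
    have hadd : PySem.Set.add (x :: acc) y = x :: PySem.Set.add acc y := by
      simp only [PySem.Set.add, PySem.Set.contains_eq_listContains, List.contains_eq_mem,
        List.mem_cons]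
      by_cases h : y ∈ acc
      · simp [h, hyx]
      · simp [h, hyx]
    rw [List.foldl_cons, hadd, ih _ hys, List.foldl_cons]

theorem ofList_eq_dedupRec (l : List String) :
    l.foldl PySem.Set.add [] = dedupRec l := by
  induction hn : l.length using Nat.strong_induction_on generalizing l with
  | _ n ih =>
  match l with
  | [] => rw [dedupRec.eq_def]; rfl
  | h :: rest =>
    have h1 : PySem.Set.add ([] : List String) h = [h] := by
      simp [PySem.Set.add, PySem.Set.contains_eq_listContains]
    have hx : h ∈ ([h] : List String) := by simp
    have hnot : h ∉ rest.filter (fun y => decide (y ≠ h)) := by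
      simp [List.mem_filter]
    calc (h :: rest).foldl PySem.Set.add []
        = rest.foldl PySem.Set.add [h] := by rw [List.foldl_cons, h1]
      _ = (rest.filter (fun y => decide (y ≠ h))).foldl PySem.Set.add [h] :=
            foldl_add_filter h rest [h] hx
      _ = h :: (rest.filter (fun y => decide (y ≠ h))).foldl PySem.Set.add [] :=
            foldl_add_cons h _ [] hnot
      _ = h :: dedupRec (rest.filter (fun y => decide (y ≠ h))) := by
            rw [ih (rest.filter (fun y => decide (y ≠ h))).length
                 (by subst hn; exact Nat.lt_succ_of_le (List.length_filter_le _ _)) _ rfl]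
      _ = dedupRec (h :: rest) := by conv_rhs => rw [dedupRec.eq_def]

-- ===== VERDICT (by name: the statement is the Claim_ definition above) =====
theorem normalize_tech_skills_spec : Claim_equal_normalize_tech_skills := by
  intro skills _
  unfold Spec_normalize_tech_skills normalize_tech_skills normalize_tech_skills_alt
  rw [foldA_eq_add, ofList_eq_dedupRec]
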